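-- pv_equiv track=rewrite | github.com/ejnunn/advent-of-code-2024 | day1/day1.py | pt2
-- ===== SOURCE A (Python) =====
-- from collections import defaultdict
--
-- def pt2(left, right):
--     # Get frequency of numbers in right list
--     right_freq = defaultdict(int)
--     for r in right:
--         right_freq[r] += 1
--
--     # Get total similarity score by adding up each number in the left list after multiplying it
--     # by the number of times the right number occurs.
--     total = 0
--     for num in left:
--         total += num * right_freq[num]
--     return total
-- ===== SOURCE B (Python) =====
-- def pt2(left, right):
--     # sorted-merge two-pointer scan: no frequency dictionary.
--     # j walks sorted right, dropping entries below the current left value;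
--     # the run rs[j:k] of entries equal to v gives its match count.
--     total = 0
--     rs = sorted(right)
--     m = len(rs)
--     j = 0
--     for v in sorted(left):
--         while j < m and rs[j] < v:
--             j += 1
--         k = j
--         while k < m and rs[k] == v:
--             k += 1
--         total += v * (k - j)
--     return total
-- ===== Notes on version B (the rewrite author's own statement) =====
-- stated objective: alternative
-- what changed: Replaced the right-list frequency dictionary with a sort-then-merge two-pointer scan: both lists are sorted (copies), a pointer over sorted right drops elements below the current left value and the leading run of equal elements gives the match count.
import Mathlib
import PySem

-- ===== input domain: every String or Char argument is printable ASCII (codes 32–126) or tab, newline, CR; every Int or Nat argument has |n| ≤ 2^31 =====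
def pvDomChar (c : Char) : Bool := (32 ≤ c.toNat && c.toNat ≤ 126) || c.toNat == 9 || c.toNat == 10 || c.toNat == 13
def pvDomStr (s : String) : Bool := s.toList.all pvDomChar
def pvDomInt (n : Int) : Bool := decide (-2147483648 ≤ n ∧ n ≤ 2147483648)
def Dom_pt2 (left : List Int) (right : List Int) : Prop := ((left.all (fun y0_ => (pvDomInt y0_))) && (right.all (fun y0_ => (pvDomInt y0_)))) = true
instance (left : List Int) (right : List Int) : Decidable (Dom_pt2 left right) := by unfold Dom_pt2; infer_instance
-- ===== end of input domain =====

-- B replaces A's frequency dictionary by a sort-then-merge two-pointer scan (alternative decomposition, not claimed faster).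

-- ===== PORT A =====
-- right_freq = defaultdict(int); for r in right: right_freq[r] += 1   (= Counter over right)
-- total = 0; for num in left: total += num * right_freq[num]
-- (the defaultdict lookup right_freq[num] inserts a 0 for a missing key; that mutation never
--  changes any stored count, so the returned total is computed here with getD — value-exact)
def pt2 (left : List Int) (right : List Int) : Int :=
  let right_freq : PySem.Dict Int Int :=
    right.foldl (fun d r => d.modify r 0 (· + 1)) PySem.Dict.empty
  left.foldl (fun total num => total + num * right_freq.getD num 0) 0

-- ===== PORT B =====
-- B's pointer j into the sorted right list is represented by the suffix rs[j:] it points at.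
-- 'while j < m and rs[j] < v: j += 1' — advancing j past elements < v yields this suffix:
def dropLt (xs : List Int) (v : Int) : List Int :=
  match xs with
  | [] => []
  | x :: t => if x < v then dropLt t v else x :: t

-- 'k = j; while k < m and rs[k] == v: k += 1' — k - j is the length of the leading run of v:
def countEqPrefix (xs : List Int) (v : Int) : Int :=
  match xs with
  | [] => 0
  | x :: t => if x = v then countEqPrefix t v + 1 else 0

def pt2_alt (left : List Int) (right : List Int) : Int :=
  let step := fun (st : Int × List Int) (v : Int) =>
    let rest := dropLt st.2 v
    (st.1 + v * countEqPrefix rest v, rest)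
  ((PySem.List.sorted left (fun x => x) false).foldl step
    (0, PySem.List.sorted right (fun x => x) false)).1

-- ===== PRECONDITION & SPEC =====
def Spec_pt2 (left : List Int) (right : List Int) (out : Int) : Prop := out = pt2_alt left right
instance (left : List Int) (right : List Int) (out : Int) : Decidable (Spec_pt2 left right out) := by unfold Spec_pt2; infer_instance

-- ===== CLAIM (what is proved, stated in full; the proofs are below) =====
def Claim_equal_pt2 : Prop := ∀ (left : List Int) (right : List Int), Dom_pt2 left right → Spec_pt2 left right (pt2 left right)

-- ===== LEMMAS AND PROOFS =====

theorem dropLt_sorted {xs : List Int} {v : Int}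
    (h : xs.Pairwise (· ≤ ·)) : (dropLt xs v).Pairwise (· ≤ ·) := by
  induction xs with
  | nil => simp [dropLt]
  | cons x t ih =>
    rw [List.pairwise_cons] at h
    by_cases hx : x < v
    · simpa [dropLt, hx] using ih h.2
    · simpa [dropLt, hx] using List.pairwise_cons.mpr h

-- in a sorted list all of whose elements are ≥ v, the leading equal run is all occurrences of v
theorem countEqPrefix_eq_count_of_ge {xs : List Int} {v : Int}
    (h : xs.Pairwise (· ≤ ·)) (hge : ∀ y ∈ xs, v ≤ y) :
    countEqPrefix xs v = (xs.count v : Int) := by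
  induction xs with
  | nil => simp [countEqPrefix]
  | cons x t ih =>
    rw [List.pairwise_cons] at h
    by_cases hx : x = v
    · subst hx
      rw [List.count_cons_self]
      have := ih h.2 (fun y hy => h.1 y hy)
      simp [countEqPrefix, this]
    · have hvx : v < x := lt_of_le_of_ne (hge x (by simp)) (fun e => hx e.symm)
      have hzero : t.count v = 0 := by
        rw [List.count_eq_zero]
        intro hv
        exact absurd (h.1 v hv) (not_le.mpr hvx)
      simp [countEqPrefix, hx, hzero]

theorem countEqPrefix_dropLt {xs : List Int} {v : Int}
    (h : xs.Pairwise (· ≤ ·)) :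
    countEqPrefix (dropLt xs v) v = (xs.count v : Int) := by
  induction xs with
  | nil => simp [dropLt, countEqPrefix]
  | cons x t ih =>
    rw [List.pairwise_cons] at h
    by_cases hx : x < v
    · have hne : x ≠ v := ne_of_lt hx
      rw [dropLt, if_pos hx, ih h.2, List.count_cons, if_neg (by simpa using hne)]
      simp
    · rw [dropLt, if_neg hx]
      refine countEqPrefix_eq_count_of_ge (List.pairwise_cons.mpr h) ?_
      intro y hy
      rcases List.mem_cons.mp hy with rfl | hy
      · exact not_lt.mp hx
      · exact le_trans (not_lt.mp hx) (h.1 y hy)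

-- dropping elements < v does not change the count of any w ≥ v
theorem count_dropLt {xs : List Int} {v w : Int} (hvw : v ≤ w) :
    (dropLt xs v).count w = xs.count w := by
  induction xs with
  | nil => rfl
  | cons x t ih =>
    by_cases hx : x < v
    · have hne : x ≠ w := ne_of_lt (lt_of_lt_of_le hx hvw)
      rw [dropLt, if_pos hx, ih, List.count_cons, if_neg (by simpa using hne)]
      simp
    · rw [dropLt, if_neg hx]

-- loop invariant for B's fold: processed left values contribute count-in-rest weights
theorem foldl_step_eq (ls rest : List Int) (acc : Int)
    (hls : ls.Pairwise (· ≤ ·)) (hrest : rest.Pairwise (· ≤ ·)) :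
    (ls.foldl (fun (st : Int × List Int) (v : Int) =>
        (st.1 + v * countEqPrefix (dropLt st.2 v) v, dropLt st.2 v)) (acc, rest)).1
      = acc + (ls.map (fun v => v * (rest.count v : Int))).sum := by
  induction ls generalizing acc rest with
  | nil => simp
  | cons v t ih =>
    rw [List.pairwise_cons] at hls
    have h1 : countEqPrefix (dropLt rest v) v = (rest.count v : Int) :=
      countEqPrefix_dropLt hrest
    have h2 : (t.map (fun w => w * ((dropLt rest v).count w : Int))).sum
        = (t.map (fun w => w * (rest.count w : Int))).sum := by
      congr 1
      exact List.map_congr_left (fun w hw => by rw [count_dropLt (hls.1 w hw)])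
    rw [List.foldl_cons, ih _ _ hls.2 (dropLt_sorted hrest), h2, h1, List.map_cons, List.sum_cons]
    ring

theorem count_sorted (xs : List Int) (v : Int) :
    (PySem.List.sorted xs (fun x => x) false).count v = xs.count v :=
  (PySem.List.sorted_perm xs (fun x => x) false).count_eq v

theorem sum_weights_perm {xs ys : List Int} (h : xs.Perm ys) (f : Int → Int) :
    (xs.map f).sum = (ys.map f).sum := (h.map f).sum_eq

-- A computes Σ_{x ∈ left} x * count x right
theorem pt2_eq_sum (left right : List Int) :
    pt2 left right = (left.map (fun v => v * (right.count v : Int))).sum := by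
  unfold pt2
  induction left using List.reverseRecOn with
  | nil => simp
  | append_singleton t x ih =>
    simp only [List.foldl_append, List.foldl_cons, List.foldl_nil, List.map_append,
      List.sum_append, List.map_cons, List.sum_cons, List.map_nil, List.sum_nil, ih]
    rw [PySem.Dict.getD_foldl_modify_add_one]
    simp

-- ===== VERDICT (by name: the statement is the Claim_ definition above) =====
theorem pt2_spec : Claim_equal_pt2 := by
  intro left right _
  show pt2 left right = pt2_alt left right
  rw [pt2_eq_sum]
  unfold pt2_alt
  rw [foldl_step_eq _ _ _
      (by simpa using PySem.List.sorted_pairwise left (fun x => x))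
      (by simpa using PySem.List.sorted_pairwise right (fun x => x))]
  rw [sum_weights_perm (PySem.List.sorted_perm left (fun x => x) false)
      (fun v => v * ((PySem.List.sorted right (fun x => x) false).count v : Int))]
  simp only [zero_add]
  congr 1
  exact List.map_congr_left (fun v _ => by rw [count_sorted])
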